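-- pv_equiv track=rewrite | github.com/phenoflow/curator | src/curator/workflow.py | _isNegative
-- ===== SOURCE A (Python) =====
-- def _isNegative(phrase: str) -> bool:
--     phrase = phrase.lower()
--     words: list[str] = phrase.split(' ')
--     return (
--         'not' in words
--         or 'never' in words
--         or 'no' in words
--         or 'without' in words
--         or any([word.startswith('non') for word in words])
--         or any([word.startswith('un') for word in words])
--     )
-- ===== SOURCE B (Python) =====
-- def _word(s: str, w: str) -> bool:
--     return s.startswith(w) and (len(s) == len(w) or s[len(w)] == ' ')
--
--
-- def _isNegative(phrase: str) -> bool: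
--     # Streaming matcher: scan the raw lowered string at word-start positions
--     # (position 0, then just past each space) without ever building a word list.
--     s = phrase.lower()
--     while True:
--         if s.startswith('non') or s.startswith('un'):
--             return True
--         if _word(s, 'not') or _word(s, 'never') or _word(s, 'no') or _word(s, 'without'):
--             return True
--         sp = s.find(' ')
--         if sp == -1:
--             return False
--         s = s[sp + 1:]
-- ===== Notes on version B (the rewrite author's own statement) =====
-- stated objective: alternative
-- what changed: B never builds the word list: instead of splitting on single spaces and making six scans over the resulting list, it streams over the raw lowered string, testing the negation patterns (prefixes non/un, and the four exact words via prefix plus a space-or-end boundary check) at each word-start position and jumping to the next word start with str.find and a slice.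
import Mathlib
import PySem

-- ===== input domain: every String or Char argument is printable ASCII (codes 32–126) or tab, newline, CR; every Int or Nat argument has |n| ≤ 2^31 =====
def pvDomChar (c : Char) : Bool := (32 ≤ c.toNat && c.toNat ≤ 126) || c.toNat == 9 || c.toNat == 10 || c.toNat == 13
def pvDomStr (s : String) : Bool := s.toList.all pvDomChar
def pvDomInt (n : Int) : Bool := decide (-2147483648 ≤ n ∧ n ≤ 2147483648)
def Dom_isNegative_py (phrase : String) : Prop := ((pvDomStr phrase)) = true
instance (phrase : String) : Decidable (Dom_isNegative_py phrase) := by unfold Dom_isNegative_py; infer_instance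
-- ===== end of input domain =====

-- B replaces A's split-into-a-word-list plus six scans by a streaming matcher on the
-- raw lowered string: it tests patterns at each word-start position and jumps from
-- space to space, never building the word list (objective: alternative).

-- ===== PORT A =====
def isNegative_py (phrase : String) : Bool :=
  let phrase := PySem.Str.lower phrase
  -- phrase.split(' '): sep is the nonempty literal " ", so split? is always some
  let words : List String := (PySem.Str.split? phrase " ").getD []
  words.contains "not"
    || words.contains "never"
    || words.contains "no"
    || words.contains "without"
    || (words.map (fun word => PySem.Str.startswith word "non")).any id
    || (words.map (fun word => PySem.Str.startswith word "un")).any id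

-- ===== PORT B =====
-- _word(s, w): s.startswith(w) and (len(s) == len(w) or s[len(w)] == ' ')
def wordHere (s w : List Char) : Bool :=
  PySem.Chars.startswith s w
    && (s.length == w.length || PySem.List.pyGet? s (w.length : Int) == some ' ')

-- lemma cited by negScan's decreasing_by (the while loop strictly shortens s)
theorem negScan_dec (s : List Char) (h : ¬ (PySem.Chars.find s [' '] == -1) = true) :
    (PySem.List.slice s (some (PySem.Chars.find s [' '] + 1)) none).length < s.length := by
  have hne : PySem.Chars.find s [' '] ≠ -1 := by simpa using h
  have h0 : 0 ≤ PySem.Chars.find s [' '] := by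
    have := PySem.Chars.neg_one_le_find s [' ']
    omega
  obtain ⟨hpre, -⟩ := PySem.Chars.find_spec (s := s) (sub := [' ']) h0
  have hlt : (PySem.Chars.find s [' ']).toNat < s.length := by
    by_contra hge
    push Not at hge
    rw [List.drop_eq_nil_of_le hge] at hpre
    exact absurd (List.prefix_nil.mp hpre) (by simp)
  rw [PySem.List.slice_from s (by omega : (0:Int) ≤ PySem.Chars.find s [' '] + 1)]
  simp only [List.length_drop]
  omega

-- the while loop of Source B: test at the current word start, then jump past the next space
def negScan (s : List Char) : Bool :=
  if PySem.Chars.startswith s "non".toList || PySem.Chars.startswith s "un".toList then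
    true
  else if wordHere s "not".toList || wordHere s "never".toList
      || wordHere s "no".toList || wordHere s "without".toList then
    true
  else if PySem.Chars.find s [' '] == -1 then
    false
  else
    negScan (PySem.List.slice s (some (PySem.Chars.find s [' '] + 1)) none)
termination_by s.length
decreasing_by exact negScan_dec s (by assumption)

def isNegative_py_alt (phrase : String) : Bool :=
  negScan (PySem.Str.lower phrase).toList

-- ===== PRECONDITION & SPEC =====
def Spec_isNegative_py (phrase : String) (out : Bool) : Prop := out = isNegative_py_alt phrase
instance (phrase : String) (out : Bool) : Decidable (Spec_isNegative_py phrase out) := by unfold Spec_isNegative_py; infer_instance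

-- ===== CLAIM (what is proved, stated in full; the proofs are below) =====
def Claim_equal_isNegative_py : Prop := ∀ (phrase : String), Dom_isNegative_py phrase → Spec_isNegative_py phrase (isNegative_py phrase)

-- ===== LEMMAS AND PROOFS =====

-- the per-word test, String level (A's six scans combine into any of this)
def negWord (word : String) : Bool :=
  word == "not" || word == "never" || word == "no" || word == "without"
    || PySem.Str.startswith word "non" || PySem.Str.startswith word "un"

-- the per-word test, char-list level
def negWordC (w : List Char) : Bool :=
  w == "not".toList || w == "never".toList || w == "no".toList || w == "without".toList
    || PySem.Chars.startswith w "non".toList || PySem.Chars.startswith w "un".toList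

-- reference split on a single space, structural form
def W : List Char → List (List Char)
  | [] => [[]]
  | c :: r => if c = ' ' then [] :: W r else (W r).modifyHead (c :: ·)

theorem modifyHead_id' (l : List (List Char)) :
    l.modifyHead (fun x => x) = l := by
  cases l <;> simp

theorem modifyHead_ext (f g : List Char → List Char) (h : ∀ x, f x = g x)
    (l : List (List Char)) : l.modifyHead f = l.modifyHead g := by
  cases l <;> simp [h]

theorem go_eq (fuel : Nat) : ∀ (l cur : List Char) (acc : List (List Char)),
    l.length ≤ fuel →
    PySem.Chars.splitOn.go [' '] fuel l cur acc
      = acc.reverse ++ (W l).modifyHead (cur.reverse ++ ·) := by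
  induction fuel with
  | zero =>
    intro l cur acc hl
    have : l = [] := List.eq_nil_of_length_eq_zero (by omega)
    subst this
    rw [PySem.Chars.splitOn.go.eq_def]
    simp [W]
  | succ fuel ih =>
    intro l cur acc hl
    cases l with
    | nil =>
      rw [PySem.Chars.splitOn.go.eq_def]
      simp [W]
    | cons c rest =>
      rw [PySem.Chars.splitOn.go.eq_def]
      simp only []
      by_cases hc : c = ' '
      · subst hc
        have hp : [' '].isPrefixOf (' ' :: rest) = true := by simp [List.isPrefixOf]
        rw [if_pos hp]
        simp only [List.length_singleton, List.drop_one, List.tail_cons]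
        rw [ih rest [] (cur.reverse :: acc) (by simpa using Nat.le_of_succ_le_succ hl)]
        simp [W, modifyHead_id']
      · have hp : [' '].isPrefixOf (c :: rest) = false := by
          simp only [List.isPrefixOf, Bool.and_eq_false_iff]
          left; simpa using fun h => hc h.symm
        rw [if_neg (by simp [hp])]
        rw [ih rest (c :: cur) acc (by simpa using Nat.le_of_succ_le_succ hl)]
        simp only [W, if_neg hc, List.modifyHead_modifyHead]
        congr 1
        apply modifyHead_ext
        intro x
        simp

theorem splitOn_space (s : List Char) : PySem.Chars.splitOn s [' '] = W s := by
  unfold PySem.Chars.splitOn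
  rw [go_eq (s.length + 1) s [] [] (by omega)]
  simp [modifyHead_id']

-- the space-free prefix u of s (its first word) carries every space-free prefix test
theorem prefix_takeWhile {p l : List Char} (hp : ∀ c ∈ p, (c != ' ') = true)
    (h : p <+: l) : p <+: l.takeWhile (· != ' ') := by
  induction p generalizing l with
  | nil => exact List.nil_prefix
  | cons c p' ih =>
    cases l with
    | nil => exact absurd (List.prefix_nil.mp h) (by simp)
    | cons d l' =>
      obtain ⟨hcd, h'⟩ := List.cons_prefix_cons.mp h
      subst hcd
      rw [List.takeWhile_cons, if_pos (hp c (by simp))]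
      exact List.cons_prefix_cons.mpr ⟨rfl, ih (fun x hx => hp x (by simp [hx])) h'⟩

theorem startswith_takeWhile (s p : List Char) (hp : ∀ c ∈ p, (c != ' ') = true) :
    PySem.Chars.startswith s p = PySem.Chars.startswith (s.takeWhile (· != ' ')) p := by
  rw [Bool.eq_iff_iff, PySem.Chars.startswith_iff, PySem.Chars.startswith_iff]
  exact ⟨prefix_takeWhile hp, fun h => h.trans (List.takeWhile_prefix _)⟩

-- wordHere s w (prefix + boundary) says exactly that the first word of s is w
theorem wordHere_eq (s w : List Char)
    (hsp : ∀ c ∈ w, (c != ' ') = true) :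
    wordHere s w = (s.takeWhile (· != ' ') == w) := by
  rw [Bool.eq_iff_iff]
  simp only [wordHere, Bool.and_eq_true, Bool.or_eq_true, beq_iff_eq,
    PySem.Chars.startswith_iff, PySem.List.pyGet?_natCast]
  constructor
  · rintro ⟨⟨t, ht⟩, hb⟩
    subst ht
    rcases hb with hlen | hget
    · have ht : t = [] := by
        simp only [List.length_append] at hlen
        have : t.length = 0 := by omega
        exact List.eq_nil_of_length_eq_zero this
      subst ht
      simp [List.takeWhile_eq_self_iff.mpr hsp]
    · rw [List.getElem?_append, if_neg (by omega)] at hget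
      simp only [Nat.sub_self] at hget
      cases t with
      | nil => simp at hget
      | cons c t' =>
        simp only [List.getElem?_cons_zero, Option.some.injEq] at hget
        subst hget
        rw [List.takeWhile_append, if_pos (by rw [List.takeWhile_eq_self_iff.mpr hsp])]
        simp
  · intro hu
    have hs : s = w ++ s.dropWhile (· != ' ') := by
      conv_lhs => rw [← List.takeWhile_append_dropWhile (p := (· != ' ')) (l := s)]
      rw [hu]
    refine ⟨⟨s.dropWhile (· != ' '), hs.symm⟩, ?_⟩
    cases hd : s.dropWhile (· != ' ') with
    | nil =>
      left
      rw [hs, hd]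
      simp
    | cons c d' =>
      right
      have hc : (c != ' ') = false := by
        have hne : s.dropWhile (· != ' ') ≠ [] := by rw [hd]; simp
        have h1 := List.head_dropWhile_not (· != ' ') hne
        have h2 : (s.dropWhile (· != ' ')).head hne = c := by
          have h3 := congrArg List.head? hd
          rw [List.head?_eq_some_head hne] at h3
          simpa using h3
        rwa [h2] at h1
      have hc' : c = ' ' := by simpa using hc
      rw [hs, hd, List.getElem?_append, if_neg (by omega)]
      simp [hc']

-- W past a space-free block
theorem W_append_clean (u v : List Char) (hu : ∀ c ∈ u, (c != ' ') = true) :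
    W (u ++ v) = (W v).modifyHead (u ++ ·) := by
  induction u with
  | nil => simp [modifyHead_id']
  | cons c u' ih =>
    have hc : ¬ c = ' ' := by simpa using hu c (by simp)
    rw [List.cons_append]
    show W (c :: (u' ++ v)) = _
    rw [W, if_neg hc, ih (fun x hx => hu x (by simp [hx])), List.modifyHead_modifyHead]
    exact modifyHead_ext _ _ (fun x => by simp) _

-- find locates the first space: the length of the space-free prefix
theorem find_space (u t : List Char) (hu : ∀ c ∈ u, (c != ' ') = true) :
    PySem.Chars.find (u ++ ' ' :: t) [' '] = (u.length : Int) := by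
  set s := u ++ ' ' :: t with hs
  have hinf : [' '] <:+: s := ⟨u, t, by simp [hs]⟩
  have h0 : 0 ≤ PySem.Chars.find s [' '] := (PySem.Chars.find_nonneg_iff s [' ']).mpr hinf
  obtain ⟨hpre, hmin⟩ := PySem.Chars.find_spec h0
  have hle : (PySem.Chars.find s [' ']).toNat ≤ u.length := by
    by_contra hgt
    exact hmin u.length (by omega) (by rw [hs, List.drop_left]; exact ⟨t, rfl⟩)
  have hge : u.length ≤ (PySem.Chars.find s [' ']).toNat := by
    by_contra hlt
    obtain ⟨r, hr⟩ := hpre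
    have hget : s[(PySem.Chars.find s [' ']).toNat]? = some ' ' := by
      rw [← List.head?_drop, ← hr]
      rfl
    rw [hs, List.getElem?_append] at hget
    rw [if_pos (show (PySem.Chars.find s [' ']).toNat < u.length by omega)] at hget
    have hmem : u[(PySem.Chars.find s [' ']).toNat] ∈ u := List.getElem_mem _
    rw [List.getElem?_eq_getElem (show (PySem.Chars.find s [' ']).toNat < u.length by omega)] at hget
    have := hu _ hmem
    simp only [Option.some.injEq] at hget
    rw [hget] at this
    simp at this
  omega

-- one unfolding of negScan as a boolean expression
theorem negScan_unfold (s : List Char) :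
    negScan s
      = ((PySem.Chars.startswith s "non".toList || PySem.Chars.startswith s "un".toList
          || (wordHere s "not".toList || wordHere s "never".toList
              || wordHere s "no".toList || wordHere s "without".toList))
         || (if PySem.Chars.find s [' '] == -1 then false
             else negScan (PySem.List.slice s (some (PySem.Chars.find s [' '] + 1)) none))) := by
  rw [negScan]
  split_ifs with h1 h2 h3 <;> simp_all [Bool.or_assoc] <;> tauto

theorem noSpace_all (w : List Char) (h : w.all (· != ' ') = true) :
    ∀ c ∈ w, (c != ' ') = true :=
  fun c hc => List.all_eq_true.mp h c hc

-- a fully space-free string is one word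
theorem W_no_space (s : List Char) (h : ∀ c ∈ s, (c != ' ') = true) : W s = [s] := by
  induction s with
  | nil => rfl
  | cons c r ih =>
    have hc : ¬ c = ' ' := by simpa using h c (by simp)
    rw [W, if_neg hc, ih (fun x hx => h x (by simp [hx]))]
    rfl

-- the word-start tests of B equal the per-word test on the first word
theorem headWord_neg (s : List Char) :
    (PySem.Chars.startswith s "non".toList || PySem.Chars.startswith s "un".toList
      || (wordHere s "not".toList || wordHere s "never".toList
          || wordHere s "no".toList || wordHere s "without".toList))
      = negWordC (s.takeWhile (· != ' ')) := by
  rw [startswith_takeWhile s "non".toList (noSpace_all _ rfl),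
      startswith_takeWhile s "un".toList (noSpace_all _ rfl),
      wordHere_eq s "not".toList (noSpace_all _ rfl),
      wordHere_eq s "never".toList (noSpace_all _ rfl),
      wordHere_eq s "no".toList (noSpace_all _ rfl),
      wordHere_eq s "without".toList (noSpace_all _ rfl)]
  rw [Bool.eq_iff_iff]
  unfold negWordC
  simp only [Bool.or_eq_true]
  tauto

-- B's streaming scan computes any-negative-word over the split
theorem negScan_eq (s : List Char) : negScan s = (W s).any negWordC := by
  suffices H : ∀ n (s : List Char), s.length = n → negScan s = (W s).any negWordC by
    exact H s.length s rfl
  intro n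
  induction n using Nat.strong_induction_on with
  | _ n ih =>
    intro s hn
    rw [negScan_unfold, headWord_neg]
    obtain ⟨u, hu_def⟩ : ∃ u, s.takeWhile (· != ' ') = u := ⟨_, rfl⟩
    have hu : ∀ c ∈ u, (c != ' ') = true :=
      fun c hc => List.mem_takeWhile_imp (p := (· != ' ')) (hu_def ▸ hc)
    rw [hu_def]
    cases hd : s.dropWhile (· != ' ') with
    | nil =>
      have hse : s = u := by
        conv_lhs => rw [← List.takeWhile_append_dropWhile (p := (· != ' ')) (l := s),
          hu_def, hd, List.append_nil]
      have hfind : PySem.Chars.find s [' '] = -1 := by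
        rw [PySem.Chars.find_eq_neg_one_iff]
        intro hinf
        have hmem : ' ' ∈ s := hinf.subset (by simp)
        have := hu ' ' (hse ▸ hmem)
        simp at this
      rw [hfind]
      rw [show s = u from hse, W_no_space u hu]
      simp
    | cons c t =>
      have hc : c = ' ' := by
        have hne : s.dropWhile (· != ' ') ≠ [] := by rw [hd]; simp
        have h1 := List.head_dropWhile_not (· != ' ') hne
        have h3 := congrArg List.head? hd
        rw [List.head?_eq_some_head hne] at h3
        simp only [List.head?_cons, Option.some.injEq] at h3
        rw [h3] at h1
        simpa using h1
      subst hc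
      have hsdec : s = u ++ ' ' :: t := by
        conv_lhs => rw [← List.takeWhile_append_dropWhile (p := (· != ' ')) (l := s),
          hu_def, hd]
      have hfind : PySem.Chars.find s [' '] = (u.length : Int) := by
        conv_lhs => rw [hsdec]
        exact find_space u t hu
      have hfind_ne : (PySem.Chars.find s [' '] == -1) = false := by
        rw [hfind]
        simp only [beq_eq_false_iff_ne, ne_eq]
        omega
      rw [hfind_ne, if_neg (by simp)]
      have hslice : PySem.List.slice s (some (PySem.Chars.find s [' '] + 1)) none = t := by
        rw [hfind, PySem.List.slice_from s (by omega)]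
        have h4 : ((u.length : Int) + 1).toNat = (u ++ [' ']).length := by
          simp
        rw [h4]
        conv_lhs => rw [hsdec, show u ++ ' ' :: t = (u ++ [' ']) ++ t by simp]
        exact List.drop_left
      rw [hslice]
      have hlt : t.length < n := by
        rw [← hn, hsdec]
        simp
        omega
      rw [ih t.length hlt t rfl]
      conv_rhs => rw [hsdec, W_append_clean u (' ' :: t) hu]
      rw [show W (' ' :: t) = [] :: W t by rw [W, if_pos rfl]]
      simp

-- A's six scans compute List.any of the per-word test (String level)
theorem portA_eq_any (ws : List String) :
    (ws.contains "not" || ws.contains "never" || ws.contains "no" || ws.contains "without"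
      || (ws.map (fun word => PySem.Str.startswith word "non")).any id
      || (ws.map (fun word => PySem.Str.startswith word "un")).any id) = ws.any negWord := by
  rw [Bool.eq_iff_iff]
  simp only [negWord, List.any_map, List.any_eq_true, List.contains_iff_mem,
    Bool.or_eq_true, beq_iff_eq, Function.comp, id]
  constructor
  · rintro (((((h|h)|h)|h)|⟨w,hw,h⟩)|⟨w,hw,h⟩)
    · exact ⟨_, h, Or.inl (Or.inl (Or.inl (Or.inl (Or.inl rfl))))⟩
    · exact ⟨_, h, Or.inl (Or.inl (Or.inl (Or.inl (Or.inr rfl))))⟩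
    · exact ⟨_, h, Or.inl (Or.inl (Or.inl (Or.inr rfl)))⟩
    · exact ⟨_, h, Or.inl (Or.inl (Or.inr rfl))⟩
    · exact ⟨w, hw, Or.inl (Or.inr h)⟩
    · exact ⟨w, hw, Or.inr h⟩
  · rintro ⟨w, hw, ((((h|h)|h)|h)|h)|h⟩
    · exact Or.inl (Or.inl (Or.inl (Or.inl (Or.inl (h ▸ hw)))))
    · exact Or.inl (Or.inl (Or.inl (Or.inl (Or.inr (h ▸ hw)))))
    · exact Or.inl (Or.inl (Or.inl (Or.inr (h ▸ hw))))
    · exact Or.inl (Or.inl (Or.inr (h ▸ hw)))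
    · exact Or.inl (Or.inr ⟨w, hw, h⟩)
    · exact Or.inr ⟨w, hw, h⟩

theorem negWord_ofList (w : List Char) : negWord (String.ofList w) = negWordC w := by
  have hstr : ∀ (t : String), (String.ofList w == t) = (w == t.toList) := by
    intro t
    rw [Bool.eq_iff_iff]
    simp only [beq_iff_eq]
    constructor
    · intro h; rw [← h, String.toList_ofList]
    · intro h; rw [h, String.ofList_toList]
  simp only [negWord, negWordC, hstr, PySem.Str.startswith_eq, String.toList_ofList]

-- ===== VERDICT (by name: the statement is the Claim_ definition above) =====
theorem isNegative_py_spec : Claim_equal_isNegative_py := by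
  intro phrase _
  unfold Spec_isNegative_py isNegative_py isNegative_py_alt
  dsimp only
  have hw : (PySem.Str.split? (PySem.Str.lower phrase) " ").getD []
      = (PySem.Chars.splitOn (PySem.Str.lower phrase).toList [' ']).map String.ofList := by
    simp [PySem.Str.split?, PySem.Chars.split?]
  rw [hw, portA_eq_any, List.any_map]
  simp only [Function.comp_def, negWord_ofList]
  rw [splitOn_space, ← negScan_eq]
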